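-- pv_equiv track=rewrite | github.com/jamesnunn/aguktools | aguktools/checkisis.py | check_isis_banks
-- ===== SOURCE A (Python) =====
-- def check_isis_banks(isis_string):
--     sections = isis_string.split('SECTION')[1:]
--
--     messages = []
--
--     for section_block in sections:
--         data = section_block.split('\n')
--         sec_id = data[1]
--
--         left_seen, right_seen = False, False
--
--         for row in data:
--             if 'left' in row:
--                 if left_seen:
--                     messages.append('{} contains multiple LB'.format(sec_id))
--                 left_seen = True
--                 if right_seen:
--                     messages.append('{} RB found before LB'.format(sec_id))
--
--             if 'right' in row:
--                 if right_seen: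
--                     messages.append('{} contains multiple RB'.format(sec_id))
--                 right_seen = True
--
--         if not left_seen:
--             messages.append('{} missing LB'.format(sec_id))
--
--         if not right_seen:
--             messages.append('{} missing RB'.format(sec_id))
--
--     return sorted(list(set(messages)), reverse=True)
-- ===== SOURCE B (Python) =====
-- def check_isis_banks(isis_string):
--     messages = set()
--     for section_block in isis_string.split('SECTION')[1:]:
--         data = section_block.split('\n')
--         sec_id = data[1]
--         left_idx = [i for i, row in enumerate(data) if 'left' in row]
--         right_idx = [i for i, row in enumerate(data) if 'right' in row]
--         if len(left_idx) >= 2: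
--             messages.add('{} contains multiple LB'.format(sec_id))
--         if len(right_idx) >= 2:
--             messages.add('{} contains multiple RB'.format(sec_id))
--         if not left_idx:
--             messages.add('{} missing LB'.format(sec_id))
--         if not right_idx:
--             messages.add('{} missing RB'.format(sec_id))
--         if left_idx and right_idx and min(right_idx) < max(left_idx):
--             messages.add('{} RB found before LB'.format(sec_id))
--     return sorted(messages, reverse=True)
-- ===== Notes on version B (the rewrite author's own statement) =====
-- stated objective: alternative
-- what changed: Replaces A's two threaded seen-flags and per-row conditional appends with per-section positional aggregates: index lists of the LB-marker and RB-marker rows, emitting each message once into a set from count/emptiness/min-max predicates (min(right_idx) < max(left_idx) for the RB-before-LB check).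
import Mathlib
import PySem

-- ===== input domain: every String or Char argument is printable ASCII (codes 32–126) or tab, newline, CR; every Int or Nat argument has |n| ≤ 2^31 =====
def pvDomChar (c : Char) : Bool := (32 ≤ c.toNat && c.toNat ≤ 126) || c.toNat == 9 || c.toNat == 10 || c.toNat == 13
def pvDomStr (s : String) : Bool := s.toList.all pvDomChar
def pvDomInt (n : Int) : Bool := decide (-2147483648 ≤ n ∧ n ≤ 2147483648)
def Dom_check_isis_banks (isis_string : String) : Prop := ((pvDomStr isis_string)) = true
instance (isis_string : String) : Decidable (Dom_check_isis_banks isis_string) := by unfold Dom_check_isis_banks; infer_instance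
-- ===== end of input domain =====

-- B replaces A's two threaded seen-flags and incremental appends by per-section positional
-- aggregates (the index lists of LB-marker and RB-marker rows) feeding a set (objective: alternative).

-- ===== PORT A =====
-- the inner `for row in data` loop of A, one row step (threads (left_seen, right_seen, messages))
def pvRowStepA (sec_id : String) (st : Bool × Bool × List String) (row : String) :
    Bool × Bool × List String :=
  let st :=
    if PySem.Str.isIn "left" row then
      let msgs := if st.1 then st.2.2 ++ [sec_id ++ " contains multiple LB"] else st.2.2
      let msgs := if st.2.1 then msgs ++ [sec_id ++ " RB found before LB"] else msgs
      (true, st.2.1, msgs)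
    else st
  if PySem.Str.isIn "right" row then
    let msgs := if st.2.1 then st.2.2 ++ [sec_id ++ " contains multiple RB"] else st.2.2
    (st.1, true, msgs)
  else st

-- one iteration of A's `for section_block in sections` loop
def pvSectionStepA (messages : List String) (section_block : String) : List String :=
  let data := (PySem.Str.split? section_block "\n").getD []   -- nonempty sep: split? is never none
  let sec_id := PySem.List.pyGetD data 1 ""                   -- data[1]; in range under Pre_
  let st := data.foldl (pvRowStepA sec_id) (false, false, messages)
  let messages := if !st.1 then st.2.2 ++ [sec_id ++ " missing LB"] else st.2.2
  if !st.2.1 then messages ++ [sec_id ++ " missing RB"] else messages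

def check_isis_banks (isis_string : String) : List String :=
  let sections := ((PySem.Str.split? isis_string "SECTION").getD []).drop 1
  let messages := sections.foldl pvSectionStepA []
  PySem.List.sorted (PySem.Set.ofList messages) (fun x => x) true

-- ===== PORT B =====
-- one iteration of B's section loop: positional aggregates into a set
def pvSectionStepB (messages : PySem.Set String) (section_block : String) : PySem.Set String :=
  let data := (PySem.Str.split? section_block "\n").getD []
  let sec_id := PySem.List.pyGetD data 1 ""
  let left_idx := ((PySem.List.enumerate data 0).filter
      (fun p => PySem.Str.isIn "left" p.2)).map (fun p => p.1)
  let right_idx := ((PySem.List.enumerate data 0).filter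
      (fun p => PySem.Str.isIn "right" p.2)).map (fun p => p.1)
  let messages := if 2 ≤ left_idx.length then
      PySem.Set.add messages (sec_id ++ " contains multiple LB") else messages
  let messages := if 2 ≤ right_idx.length then
      PySem.Set.add messages (sec_id ++ " contains multiple RB") else messages
  let messages := if left_idx.length = 0 then
      PySem.Set.add messages (sec_id ++ " missing LB") else messages
  let messages := if right_idx.length = 0 then
      PySem.Set.add messages (sec_id ++ " missing RB") else messages
  -- `if left_idx and right_idx and min(right_idx) < max(left_idx)`
  if left_idx ≠ [] ∧ right_idx ≠ [] ∧
      (PySem.List.min? right_idx (fun i => i)).getD 0 < (PySem.List.max? left_idx (fun i => i)).getD 0 then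
    PySem.Set.add messages (sec_id ++ " RB found before LB")
  else messages

def check_isis_banks_alt (isis_string : String) : List String :=
  let messages := (((PySem.Str.split? isis_string "SECTION").getD []).drop 1).foldl
      pvSectionStepB PySem.Set.empty
  PySem.List.sorted messages (fun x => x) true

-- ===== PRECONDITION & SPEC =====
-- Pre_ excludes exactly the inputs on which the Python raises IndexError (both A and B do:
-- `data[1]` on a section block that splits into fewer than two lines).
def Pre_check_isis_banks (isis_string : String) : Prop :=
  ∀ b ∈ ((PySem.Str.split? isis_string "SECTION").getD []).drop 1,
    2 ≤ ((PySem.Str.split? b "\n").getD []).length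
instance (isis_string : String) : Decidable (Pre_check_isis_banks isis_string) := by
  unfold Pre_check_isis_banks; infer_instance

def pvWitness_check_isis_banks : String := "SECTIONleft\nid\nright"

def Spec_check_isis_banks (isis_string : String) (out : List String) : Prop :=
  out = check_isis_banks_alt isis_string
instance (isis_string : String) (out : List String) : Decidable (Spec_check_isis_banks isis_string out) := by
  unfold Spec_check_isis_banks; infer_instance

-- ===== CLAIM (what is proved, stated in full; the proofs are below) =====
def Claim_equal_check_isis_banks : Prop := ∀ (isis_string : String), Dom_check_isis_banks isis_string → Pre_check_isis_banks isis_string → Spec_check_isis_banks isis_string (check_isis_banks isis_string)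

-- ===== LEMMAS AND PROOFS =====

-- row predicates, per-block statistics, and the per-section message characterisation
def pvHasL (r : String) : Bool := PySem.Str.isIn "left" r
def pvHasR (r : String) : Bool := PySem.Str.isIn "right" r
def pvCntL (rows : List String) : Nat := (rows.filter pvHasL).length
def pvCntR (rows : List String) : Nat := (rows.filter pvHasR).length
-- `pvCross rows` : some RB-marker row is followed (strictly later) by some LB-marker row
def pvCross : List String → Bool
  | [] => false
  | r :: t => (pvHasR r && t.any pvHasL) || pvCross t
def pvSecMsgs (b x : String) : Prop :=
  let data := (PySem.Str.split? b "\n").getD []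
  let sid := PySem.List.pyGetD data 1 ""
  (x = sid ++ " contains multiple LB" ∧ 2 ≤ pvCntL data)
  ∨ (x = sid ++ " RB found before LB" ∧ pvCross data = true)
  ∨ (x = sid ++ " contains multiple RB" ∧ 2 ≤ pvCntR data)
  ∨ (x = sid ++ " missing LB" ∧ pvCntL data = 0)
  ∨ (x = sid ++ " missing RB" ∧ pvCntR data = 0)

theorem pvAnyL_iff (t : List String) : t.any pvHasL = true ↔ 1 ≤ pvCntL t := by
  simp [pvCntL, Nat.one_le_iff_ne_zero, Ne, List.length_eq_zero_iff, List.filter_eq_nil_iff,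
    List.any_eq_true]
theorem pvAnyR_iff (t : List String) : t.any pvHasR = true ↔ 1 ≤ pvCntR t := by
  simp [pvCntR, Nat.one_le_iff_ne_zero, Ne, List.length_eq_zero_iff, List.filter_eq_nil_iff,
    List.any_eq_true]

theorem pvIdx_mem (data : List String) (f : String → Bool) (i : Int) :
    i ∈ ((PySem.List.enumerate data 0).filter (fun p => f p.2)).map (fun p => p.1)
      ↔ ∃ k : Nat, ∃ h : k < data.length, i = (k : Int) ∧ f data[k] := by
  simp only [List.mem_map, List.mem_filter, PySem.List.mem_enumerate_iff]
  constructor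
  · rintro ⟨⟨j, v⟩, ⟨⟨k, hk, heq⟩, hf⟩, rfl⟩
    cases heq; exact ⟨k, hk, by simpa using hf⟩
  · rintro ⟨k, hk, rfl, hf⟩
    exact ⟨((k : Int), data[k]), ⟨⟨k, hk, by simp⟩, hf⟩, rfl⟩

theorem pvIdx_length (data : List String) (f : String → Bool) :
    (((PySem.List.enumerate data 0).filter (fun p => f p.2)).map (fun p => p.1)).length
      = (data.filter f).length := by
  have : ∀ (s : Int), (((PySem.List.enumerate data s).filter (fun p => f p.2))).length
      = (data.filter f).length := by
    induction data with
    | nil => intro s; simp [PySem.List.enumerate]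
    | cons r t ih =>
        intro s
        rw [PySem.List.enumerate_cons]
        simp only [List.filter_cons, List.length_cons]
        by_cases h : f r <;> simp [h, ih]
  simp [this 0]

theorem pvCross_iff (data : List String) :
    pvCross data = true ↔ ∃ j k : Nat, ∃ hj : j < data.length, ∃ hk : k < data.length,
      j < k ∧ pvHasR data[j] ∧ pvHasL data[k] := by
  induction data with
  | nil => simp [pvCross]
  | cons r t ih =>
      rw [pvCross, Bool.or_eq_true, Bool.and_eq_true, ih]
      constructor
      · rintro (⟨hr, ha⟩ | ⟨j, k, hj, hk, hlt, h1, h2⟩)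
        · rcases List.any_eq_true.1 ha with ⟨x, hx, hl⟩
          rcases List.mem_iff_getElem.1 hx with ⟨k, hk, rfl⟩
          exact ⟨0, k+1, by simp, by simp [Nat.succ_lt_succ hk], by omega, by simpa using hr, by simpa using hl⟩
        · exact ⟨j+1, k+1, by simpa using Nat.succ_lt_succ hj, by simpa using Nat.succ_lt_succ hk,
            by omega, by simpa using h1, by simpa using h2⟩
      · rintro ⟨j, k, hj, hk, hlt, h1, h2⟩
        cases j with
        | zero =>
            left
            refine ⟨by simpa using h1, List.any_eq_true.2 ?_⟩
            have hk' : k - 1 < t.length := by simp at hk; omega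
            refine ⟨t[k-1], List.getElem_mem _, ?_⟩
            have : (r :: t)[k] = t[k-1] := by
              rcases k with _ | k; omega; simp
            rwa [this] at h2
        | succ j =>
            right
            have hj' : j < t.length := by simp at hj; omega
            have hk' : k - 1 < t.length := by simp at hk; omega
            refine ⟨j, k-1, hj', hk', by omega, ?_, ?_⟩
            · simpa using h1
            · have : (r :: t)[k] = t[k-1] := by rcases k with _ | k; omega; simp
              rwa [this] at h2

theorem pvFoldA_flags (sid : String) (rows : List String) (ls rs : Bool) (msgs : List String) :
    (rows.foldl (pvRowStepA sid) (ls, rs, msgs)).1 = (ls || rows.any pvHasL)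
    ∧ (rows.foldl (pvRowStepA sid) (ls, rs, msgs)).2.1 = (rs || rows.any pvHasR) := by
  induction rows generalizing ls rs msgs with
  | nil => simp
  | cons r t ih =>
      simp only [List.foldl_cons, List.any_cons]
      have : pvRowStepA sid (ls, rs, msgs) r
          = ((ls || pvHasL r), (rs || pvHasR r), (pvRowStepA sid (ls, rs, msgs) r).2.2) := by
        unfold pvRowStepA pvHasL pvHasR
        by_cases hl : PySem.Str.isIn "left" r <;> by_cases hr : PySem.Str.isIn "right" r <;>
          simp [hl, hr, -PySem.Str.isIn_eq]
      rw [this]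
      rcases ih (ls || pvHasL r) (rs || pvHasR r) (pvRowStepA sid (ls, rs, msgs) r).2.2 with ⟨h1, h2⟩
      rw [h1, h2]
      simp [Bool.or_assoc]

theorem pvStepA_snd (sid : String) (ls rs : Bool) (msgs : List String) (r : String) :
    (pvRowStepA sid (ls, rs, msgs) r).2.2
      = ((((msgs ++ if pvHasL r ∧ ls then [sid ++ " contains multiple LB"] else [])
          ++ if pvHasL r ∧ rs then [sid ++ " RB found before LB"] else [])
          ++ if pvHasR r ∧ rs then [sid ++ " contains multiple RB"] else [])) := by
  unfold pvRowStepA pvHasL pvHasR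
  by_cases hl : PySem.Str.isIn "left" r <;> by_cases hr : PySem.Str.isIn "right" r <;>
    by_cases h1 : ls <;> by_cases h2 : rs <;>
    simp [hl, hr, h1, h2, -PySem.Str.isIn_eq]

set_option maxHeartbeats 1600000 in
theorem pvFoldA_mem (sid : String) (rows : List String) (ls rs : Bool) (msgs : List String)
    (x : String) :
    x ∈ (rows.foldl (pvRowStepA sid) (ls, rs, msgs)).2.2 ↔ x ∈ msgs
      ∨ (x = sid ++ " contains multiple LB" ∧ 1 ≤ pvCntL rows ∧ (ls = true ∨ 2 ≤ pvCntL rows))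
      ∨ (x = sid ++ " RB found before LB" ∧ ((rs = true ∧ 1 ≤ pvCntL rows) ∨ pvCross rows = true))
      ∨ (x = sid ++ " contains multiple RB" ∧ 1 ≤ pvCntR rows ∧ (rs = true ∨ 2 ≤ pvCntR rows)) := by
  induction rows generalizing ls rs msgs with
  | nil => simp [pvCntL, pvCntR, pvCross]
  | cons r t ih =>
      simp only [List.foldl_cons]
      have hstep : pvRowStepA sid (ls, rs, msgs) r
          = ((ls || pvHasL r), (rs || pvHasR r), (pvRowStepA sid (ls, rs, msgs) r).2.2) := by
        unfold pvRowStepA pvHasL pvHasR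
        by_cases hl : PySem.Str.isIn "left" r <;> by_cases hr : PySem.Str.isIn "right" r <;>
          simp [hl, hr, -PySem.Str.isIn_eq]
      rw [hstep, ih, pvStepA_snd]
      have hcntl : pvCntL (r :: t) = (if pvHasL r = true then 1 else 0) + pvCntL t := by
        simp [pvCntL, List.filter_cons]; split <;> simp <;> omega
      have hcntr : pvCntR (r :: t) = (if pvHasR r = true then 1 else 0) + pvCntR t := by
        simp [pvCntR, List.filter_cons]; split <;> simp <;> omega
      have hcross : (pvCross (r :: t) = true)
          ↔ ((pvHasR r = true ∧ 1 ≤ pvCntL t) ∨ pvCross t = true) := by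
        rw [pvCross]; simp [pvAnyL_iff t]
      rw [hcntl, hcntr, hcross]
      simp only [List.mem_append, List.mem_singleton, List.mem_ite_nil_right]
      generalize (x ∈ msgs) = P0
      generalize (x = sid ++ " contains multiple LB") = P1
      generalize (x = sid ++ " RB found before LB") = P2
      generalize (x = sid ++ " contains multiple RB") = P3
      generalize (pvCross t = true) = C
      generalize pvCntL t = n
      generalize pvCntR t = m
      have g1 : (2 ≤ 1 + n) ↔ (1 ≤ n) := by omega
      have g2 : (2 ≤ 1 + m) ↔ (1 ≤ m) := by omega
      have g3 : (1 ≤ 1 + n) ↔ True := by simp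
      have g4 : (1 ≤ 1 + m) ↔ True := by simp
      clear ih hstep hcntl hcntr hcross
      by_cases hl : pvHasL r <;> by_cases hr : pvHasR r <;>
        by_cases h1 : ls <;> by_cases h2 : rs <;>
        simp [hl, hr, h1, h2, g1, g2] <;> tauto

set_option maxHeartbeats 1600000 in
theorem pvSectionStepA_mem (msgs : List String) (b x : String) :
    x ∈ pvSectionStepA msgs b ↔ x ∈ msgs ∨ pvSecMsgs b x := by
  unfold pvSectionStepA pvSecMsgs
  dsimp only []
  generalize (PySem.Str.split? b "\n").getD [] = data
  generalize PySem.List.pyGetD data 1 "" = sid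
  obtain ⟨h1, h2⟩ := pvFoldA_flags sid data false false msgs
  rw [h1, h2]
  have hmem := pvFoldA_mem sid data false false msgs x
  have hL := pvAnyL_iff data
  have hR := pvAnyR_iff data
  cases hal : data.any pvHasL <;> cases har : data.any pvHasR <;>
    rw [hal] at h1 <;> rw [har] at h2 <;>
    simp only [Bool.false_or, Bool.not_true, Bool.not_false, if_true, if_false,
      Bool.false_eq_true, Bool.true_eq_false, ite_true, ite_false, List.mem_append,
      List.mem_singleton] <;>
    rw [hmem] <;>
    simp only [Bool.false_eq_true, false_or, false_and, or_false, List.mem_append,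
      List.mem_singleton] <;>
    clear hmem h1 h2
  · -- both absent
    have kL1 : ¬ 1 ≤ pvCntL data := fun h => by simp [hL.2 h] at hal
    have kR1 : ¬ 1 ≤ pvCntR data := fun h => by simp [hR.2 h] at har
    have kL : pvCntL data = 0 := by omega
    have kR : pvCntR data = 0 := by omega
    have kL2 : ¬ (2 ≤ pvCntL data) := by omega
    have kR2 : ¬ (2 ≤ pvCntR data) := by omega
    clear hL hR hal har
    tauto
  · -- left absent, right present
    have kL1 : ¬ 1 ≤ pvCntL data := fun h => by simp [hL.2 h] at hal
    have kR1 : 1 ≤ pvCntR data := hR.1 har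
    have kL : pvCntL data = 0 := by omega
    have kL2 : ¬ (2 ≤ pvCntL data) := by omega
    have kR0 : ¬ (pvCntR data = 0) := by omega
    clear hL hR hal har
    tauto
  · -- left present, right absent
    have kL1 : 1 ≤ pvCntL data := hL.1 hal
    have kR1 : ¬ 1 ≤ pvCntR data := fun h => by simp [hR.2 h] at har
    have kR : pvCntR data = 0 := by omega
    have kR2 : ¬ (2 ≤ pvCntR data) := by omega
    have kL0 : ¬ (pvCntL data = 0) := by omega
    clear hL hR hal har
    tauto
  · -- both present
    have kL1 : 1 ≤ pvCntL data := hL.1 hal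
    have kR1 : 1 ≤ pvCntR data := hR.1 har
    have kL0 : ¬ (pvCntL data = 0) := by omega
    have kR0 : ¬ (pvCntR data = 0) := by omega
    clear hL hR hal har
    tauto


theorem pvMemIte (s : PySem.Set String) (c : Prop) [Decidable c] (x y : String) :
    (y ∈ if c then PySem.Set.add s x else s) ↔ y ∈ s ∨ (c ∧ y = x) := by
  split <;> rename_i h <;> simp [PySem.Set.mem_add, h]
theorem pvNodupIte (s : PySem.Set String) (c : Prop) [Decidable c] (x : String)
    (h : s.Nodup) : (if c then PySem.Set.add s x else s).Nodup := by
  split; exacts [PySem.Set.nodup_add _ _ h, h]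
theorem pvCntL_pos_of_cross (data : List String) (h : pvCross data = true) :
    1 ≤ pvCntL data := by
  rcases (pvCross_iff data).1 h with ⟨j, k, hj, hk, _, _, h2⟩
  have hm : data[k] ∈ data.filter pvHasL := List.mem_filter.2 ⟨List.getElem_mem hk, h2⟩
  show 1 ≤ (data.filter pvHasL).length
  exact List.length_pos_of_mem hm
theorem pvCntR_pos_of_cross (data : List String) (h : pvCross data = true) :
    1 ≤ pvCntR data := by
  rcases (pvCross_iff data).1 h with ⟨j, k, hj, hk, _, h1, _⟩
  have hm : data[j] ∈ data.filter pvHasR := List.mem_filter.2 ⟨List.getElem_mem hj, h1⟩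
  show 1 ≤ (data.filter pvHasR).length
  exact List.length_pos_of_mem hm

set_option maxHeartbeats 1600000 in
theorem pvSectionStepB_mem (msgs : PySem.Set String) (b x : String) :
    x ∈ pvSectionStepB msgs b ↔ x ∈ msgs ∨ pvSecMsgs b x := by
  unfold pvSectionStepB pvSecMsgs
  dsimp only []
  generalize (PySem.Str.split? b "\n").getD [] = data
  generalize PySem.List.pyGetD data 1 "" = sid
  have hlenL : (((PySem.List.enumerate data 0).filter
      (fun p => PySem.Str.isIn "left" p.2)).map (fun p => p.1)).length = pvCntL data :=
    pvIdx_length data (PySem.Str.isIn "left")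
  have hlenR : (((PySem.List.enumerate data 0).filter
      (fun p => PySem.Str.isIn "right" p.2)).map (fun p => p.1)).length = pvCntR data :=
    pvIdx_length data (PySem.Str.isIn "right")
  have hC : (((PySem.List.enumerate data 0).filter
        (fun p => PySem.Str.isIn "left" p.2)).map (fun p => p.1) ≠ [] ∧
      ((PySem.List.enumerate data 0).filter
        (fun p => PySem.Str.isIn "right" p.2)).map (fun p => p.1) ≠ [] ∧
      (PySem.List.min? (((PySem.List.enumerate data 0).filter
        (fun p => PySem.Str.isIn "right" p.2)).map (fun p => p.1)) (fun i => i)).getD 0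
        < (PySem.List.max? (((PySem.List.enumerate data 0).filter
        (fun p => PySem.Str.isIn "left" p.2)).map (fun p => p.1)) (fun i => i)).getD 0)
      ↔ pvCross data = true := by
    constructor
    · rintro ⟨hLne, hRne, hlt⟩
      rcases hmin : PySem.List.min? (((PySem.List.enumerate data 0).filter
          (fun p => PySem.Str.isIn "right" p.2)).map (fun p => p.1)) (fun i => i) with _ | r
      · exact absurd ((PySem.List.min?_eq_none_iff _ _).1 hmin) hRne
      rcases hmax : PySem.List.max? (((PySem.List.enumerate data 0).filter
          (fun p => PySem.Str.isIn "left" p.2)).map (fun p => p.1)) (fun i => i) with _ | l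
      · exact absurd ((PySem.List.max?_eq_none_iff _ _).1 hmax) hLne
      rw [hmin, hmax] at hlt
      simp only [Option.getD_some] at hlt
      rcases (pvIdx_mem data _ r).1 (PySem.List.min?_mem hmin) with ⟨kr, hkr, hre, hfr⟩
      rcases (pvIdx_mem data _ l).1 (PySem.List.max?_mem hmax) with ⟨kl, hkl, hle, hfl⟩
      refine (pvCross_iff data).2 ⟨kr, kl, hkr, hkl, ?_, hfr, hfl⟩
      rw [hre, hle] at hlt
      exact_mod_cast hlt
    · intro h
      have hL1 := pvCntL_pos_of_cross data h
      have hR1 := pvCntR_pos_of_cross data h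
      have hLne : ((PySem.List.enumerate data 0).filter
          (fun p => PySem.Str.isIn "left" p.2)).map (fun p => p.1) ≠ [] := by
        intro he; rw [← hlenL, he] at hL1; simp at hL1
      have hRne : ((PySem.List.enumerate data 0).filter
          (fun p => PySem.Str.isIn "right" p.2)).map (fun p => p.1) ≠ [] := by
        intro he; rw [← hlenR, he] at hR1; simp at hR1
      refine ⟨hLne, hRne, ?_⟩
      rcases (pvCross_iff data).1 h with ⟨j, k, hj, hk, hjk, h1, h2⟩
      have hjR : (j : Int) ∈ ((PySem.List.enumerate data 0).filter
          (fun p => PySem.Str.isIn "right" p.2)).map (fun p => p.1) :=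
        (pvIdx_mem data _ _).2 ⟨j, hj, rfl, h1⟩
      have hkL : (k : Int) ∈ ((PySem.List.enumerate data 0).filter
          (fun p => PySem.Str.isIn "left" p.2)).map (fun p => p.1) :=
        (pvIdx_mem data _ _).2 ⟨k, hk, rfl, h2⟩
      rcases hmin : PySem.List.min? (((PySem.List.enumerate data 0).filter
          (fun p => PySem.Str.isIn "right" p.2)).map (fun p => p.1)) (fun i => i) with _ | r
      · rw [(PySem.List.min?_eq_none_iff _ _).1 hmin] at hjR; simp at hjR
      rcases hmax : PySem.List.max? (((PySem.List.enumerate data 0).filter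
          (fun p => PySem.Str.isIn "left" p.2)).map (fun p => p.1)) (fun i => i) with _ | l
      · rw [(PySem.List.max?_eq_none_iff _ _).1 hmax] at hkL; simp at hkL
      rw [hmin, hmax]
      simp only [Option.getD_some]
      have h3 := PySem.List.min?_isMin hmin _ hjR
      have h4 := PySem.List.max?_isMax hmax _ hkL
      simp only at h3 h4
      have : (j : Int) < (k : Int) := by exact_mod_cast hjk
      omega
  rw [hlenL, hlenR]
  simp only [pvMemIte]
  rw [hC]
  clear hC hlenL hlenR
  tauto

theorem pvSectionStepB_nodup (msgs : PySem.Set String) (b : String) (h : msgs.Nodup) :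
    (pvSectionStepB msgs b).Nodup := by
  unfold pvSectionStepB
  dsimp only []
  exact pvNodupIte _ _ _ (pvNodupIte _ _ _ (pvNodupIte _ _ _ (pvNodupIte _ _ _ (pvNodupIte _ _ _ h))))

theorem pvFolds_mem (sections : List String) (msgsA : List String) (msgsB : PySem.Set String)
    (hmem : ∀ y, y ∈ msgsA ↔ y ∈ msgsB) (x : String) :
    x ∈ sections.foldl pvSectionStepA msgsA ↔ x ∈ sections.foldl pvSectionStepB msgsB := by
  induction sections generalizing msgsA msgsB with
  | nil => simpa using hmem x
  | cons b t ih =>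
      simp only [List.foldl_cons]
      exact ih _ _ (fun y => by rw [pvSectionStepA_mem, pvSectionStepB_mem, hmem y])

theorem pvFoldB_nodup (sections : List String) (msgsB : PySem.Set String) (h : msgsB.Nodup) :
    (sections.foldl pvSectionStepB msgsB).Nodup := by
  induction sections generalizing msgsB with
  | nil => exact h
  | cons b t ih => exact ih _ (pvSectionStepB_nodup _ _ h)

-- same member set + right side duplicate-free ⇒ the two reverse-sorted dedups coincide
theorem pvSorted_congr (xs ys : List String) (hys : ys.Nodup)
    (h : ∀ x, x ∈ xs ↔ x ∈ ys) :
    PySem.List.sorted (PySem.Set.ofList xs) (fun x => x) true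
      = PySem.List.sorted ys (fun x => x) true := by
  have hperm : (PySem.List.sorted ys (fun x : String => x) true).Perm (PySem.Set.ofList xs) := by
    refine (PySem.List.sorted_perm ys _ true).trans ?_
    refine (List.perm_ext_iff_of_nodup hys (PySem.Set.nodup_ofList xs)).2 (fun a => ?_)
    rw [PySem.Set.mem_ofList]; exact ((h a).symm)
  refine PySem.List.sorted_rev_eq_of_perm_of_pairwise_gt _ _ _ hperm ?_
  have h1 := PySem.List.sorted_pairwise_rev ys (fun x : String => x)
  have h2 : (PySem.List.sorted ys (fun x : String => x) true).Nodup :=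
    ((PySem.List.sorted_perm ys _ true).nodup_iff).2 hys
  exact (h1.and h2).imp (fun {a b} hab => lt_of_le_of_ne hab.1 (Ne.symm hab.2))

-- ===== VERDICT (by name: the statement is the Claim_ definition above) =====
theorem check_isis_banks_spec : Claim_equal_check_isis_banks := by
  intro s _ _
  unfold Spec_check_isis_banks check_isis_banks check_isis_banks_alt
  exact pvSorted_congr _ _ (pvFoldB_nodup _ _ (by simp [PySem.Set.empty]))
    (fun x => pvFolds_mem _ _ _ (by simp [PySem.Set.empty]) x)
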